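-- pv_equiv track=rewrite | github.com/greb/aoc2018 | days/day2.py | part1
-- ===== SOURCE A (Python) =====
-- import itertools
--
-- def part1(inp):
--     boxes = inp.splitlines()
--
--     cnt_doubles = 0
--     cnt_tripples = 0
--
--     for box in boxes:
--         box = sorted(box)
--         counts = [len(list(g)) for _, g in itertools.groupby(box)]
--
--         if 2 in counts:
--             cnt_doubles += 1
--         if 3 in counts:
--             cnt_tripples += 1
--
--     return cnt_doubles * cnt_tripples
-- ===== SOURCE B (Python) =====
-- def part1(inp):
--     lines = inp.splitlines()
--     doubles = sum(1 for line in lines if any(line.count(c) == 2 for c in set(line)))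
--     tripples = sum(1 for line in lines if any(line.count(c) == 3 for c in set(line)))
--     return doubles * tripples
-- ===== Notes on version B (the rewrite author's own statement) =====
-- stated objective: idiomatic
-- what changed: Per line, instead of sorting the characters and measuring itertools.groupby run lengths inside one accumulator loop, B asks directly whether any distinct character occurs exactly 2 (resp. 3) times via set(line)/str.count, and obtains the two tallies as two comprehension sums instead of mutable counters.
import Mathlib
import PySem

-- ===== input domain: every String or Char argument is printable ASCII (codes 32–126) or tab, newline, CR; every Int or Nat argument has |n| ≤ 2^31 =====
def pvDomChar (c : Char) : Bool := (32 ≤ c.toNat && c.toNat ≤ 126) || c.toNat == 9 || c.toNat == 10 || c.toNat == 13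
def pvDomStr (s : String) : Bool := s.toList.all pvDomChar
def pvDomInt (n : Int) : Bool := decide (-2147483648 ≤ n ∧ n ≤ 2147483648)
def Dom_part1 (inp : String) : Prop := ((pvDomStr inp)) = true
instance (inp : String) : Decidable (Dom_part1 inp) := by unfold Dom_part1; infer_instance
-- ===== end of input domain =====

-- B replaces sort + itertools.groupby run lengths and the mutable counter loop by a direct
-- "some distinct char occurs exactly n times" test and two comprehension sums (idiomatic; same cost class).

-- ===== PORT A =====
-- itertools.groupby over the sorted box, keeping only each group's length
def groupLens : List Char → List Int
  | [] => []
  | c :: t =>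
    ((t.takeWhile (· == c)).length + 1 : Int) :: groupLens (t.dropWhile (· == c))
termination_by l => l.length
decreasing_by
  simp only [List.length_cons]
  exact Nat.lt_succ_of_le (List.length_dropWhile_le _ _)

def part1 (inp : String) : Int :=
  let boxes := PySem.Str.splitlines inp
  let res := boxes.foldl (fun (acc : Int × Int) box =>
      let counts := groupLens (PySem.List.sorted box.toList (fun c => c) false)
      let acc := if (2 : Int) ∈ counts then (acc.1 + 1, acc.2) else acc
      if (3 : Int) ∈ counts then (acc.1, acc.2 + 1) else acc)
    ((0 : Int), (0 : Int))
  res.1 * res.2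

-- ===== PORT B =====
-- any(line.count(c) == n for c in set(line)); `any` over a set is order-independent,
-- and str.count with a single-character needle is exactly the character count.
def hasExactly (line : String) (n : Nat) : Bool :=
  (PySem.Set.ofList line.toList).any (fun c => line.toList.count c == n)

def part1_alt (inp : String) : Int :=
  let lines := PySem.Str.splitlines inp
  let doubles : Int := lines.countP (fun line => hasExactly line 2)
  let tripples : Int := lines.countP (fun line => hasExactly line 3)
  doubles * tripples

-- ===== PRECONDITION & SPEC =====
def Spec_part1 (inp : String) (out : Int) : Prop := out = part1_alt inp
instance (inp : String) (out : Int) : Decidable (Spec_part1 inp out) := by unfold Spec_part1; infer_instance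

-- ===== CLAIM (what is proved, stated in full; the proofs are below) =====
def Claim_equal_part1 : Prop := ∀ (inp : String), Dom_part1 inp → Spec_part1 inp (part1 inp)


-- ===== LEMMAS AND PROOFS =====

-- after dropping the leading run of c from a sorted tail, every element is strictly above c
theorem dropWhile_gt (t : List Char) (c : Char) (hle : ∀ x ∈ t, c ≤ x)
    (hpw : t.Pairwise (· ≤ ·)) : ∀ x ∈ t.dropWhile (· == c), c < x := by
  induction t with
  | nil => simp
  | cons d r ih =>
    by_cases hd : (d == c) = true
    · simp only [List.dropWhile_cons, hd, if_true]
      exact ih (fun x hx => hle x (List.mem_cons_of_mem _ hx)) hpw.of_cons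
    · have hd' : (d == c) = false := by simpa using hd
      simp only [List.dropWhile_cons, hd', Bool.false_eq_true, if_false]
      have hcd : c < d := lt_of_le_of_ne (hle d (List.mem_cons_self)) (fun h => hd (by simp [h]))
      intro x hx
      rcases List.mem_cons.mp hx with rfl | hx
      · exact hcd
      · exact lt_of_lt_of_le hcd ((List.pairwise_cons.mp hpw).1 x hx)

-- membership in the group lengths of a sorted list = some element's multiplicity
theorem mem_groupLens_sorted (s : List Char) (hs : s.Pairwise (· ≤ ·)) (n : Int) :
    n ∈ groupLens s ↔ ∃ c ∈ s, (s.count c : Int) = n := by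
  match s with
  | [] => simp [groupLens]
  | c :: t =>
    have hle : ∀ x ∈ t, c ≤ x := (List.pairwise_cons.mp hs).1
    have hpwt : t.Pairwise (· ≤ ·) := hs.of_cons
    have hgt : ∀ x ∈ t.dropWhile (· == c), c < x := dropWhile_gt t c hle hpwt
    have hne : ∀ x ∈ t.dropWhile (· == c), x ≠ c := fun x hx h => absurd (hgt x hx) (by simp [h])
    have hpwr : (t.dropWhile (· == c)).Pairwise (· ≤ ·) :=
      List.Pairwise.sublist (List.dropWhile_sublist _) hpwt
    have hrunc : ∀ x ∈ t.takeWhile (· == c), x = c := by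
      intro x hx
      simpa using List.mem_takeWhile_imp hx
    have hsplit : t = t.takeWhile (· == c) ++ t.dropWhile (· == c) :=
      (List.takeWhile_append_dropWhile).symm
    have hcount_c : (c :: t).count c = (t.takeWhile (· == c)).length + 1 := by
      rw [List.count_cons_self]
      conv_lhs => rw [hsplit]
      rw [List.count_append]
      have h1 : (t.takeWhile (· == c)).count c = (t.takeWhile (· == c)).length :=
        List.count_eq_length.mpr (fun b hb => (hrunc b hb).symm)
      have h2 : (t.dropWhile (· == c)).count c = 0 :=
        List.count_eq_zero.mpr (fun h => hne c h rfl)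
      omega
    have hcount_ne : ∀ x, x ≠ c → (c :: t).count x = (t.dropWhile (· == c)).count x := by
      intro x hx
      have h1 : (t.takeWhile (· == c)).count x = 0 :=
        List.count_eq_zero.mpr (fun h => hx (hrunc x h))
      conv_lhs => rw [hsplit]
      rw [List.count_cons, List.count_append]
      simp [h1]
      exact fun h => hx h.symm
    have IH := mem_groupLens_sorted (t.dropWhile (· == c)) hpwr n
    rw [groupLens]
    constructor
    · intro h
      rcases List.mem_cons.mp h with h | h
      · refine ⟨c, List.mem_cons_self, ?_⟩
        rw [hcount_c]
        push_cast at h ⊢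
        omega
      · rcases IH.mp h with ⟨x, hx, hxn⟩
        refine ⟨x, List.mem_cons_of_mem _ ?_, ?_⟩
        · rw [hsplit]
          exact List.mem_append_right _ hx
        · rw [hcount_ne x (hne x hx)]
          exact hxn
    · rintro ⟨x, hx, hxn⟩
      by_cases hxc : x = c
      · subst hxc
        rw [hcount_c] at hxn
        refine List.mem_cons.mpr (Or.inl ?_)
        push_cast at hxn ⊢
        omega
      · have hxt : x ∈ t := by
          rcases List.mem_cons.mp hx with h | h
          · exact absurd h hxc
          · exact h
        rw [hsplit] at hxt
        have hxr : x ∈ t.dropWhile (· == c) := by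
          rcases List.mem_append.mp hxt with h | h
          · exact absurd (hrunc x h) hxc
          · exact h
        refine List.mem_cons.mpr (Or.inr (IH.mpr ⟨x, hxr, ?_⟩))
        rw [← hcount_ne x hxc]
        exact hxn
termination_by s.length
decreasing_by simpa using Nat.lt_succ_of_le (List.length_dropWhile_le _ _)

-- per line: A's membership test equals B's hasExactly
theorem counts_iff_hasExactly (box : String) (n : Nat) :
    decide ((n : Int) ∈ groupLens (PySem.List.sorted box.toList (fun c => c) false))
      = hasExactly box n := by
  have hperm := PySem.List.sorted_perm box.toList (fun c => c) false
  have hpw : (PySem.List.sorted box.toList (fun c => c) false).Pairwise (· ≤ ·) :=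
    PySem.List.sorted_pairwise box.toList (fun c => c)
  rw [Bool.eq_iff_iff]
  simp only [decide_eq_true_eq, hasExactly, List.any_eq_true, PySem.Set.mem_ofList, beq_iff_eq]
  rw [mem_groupLens_sorted _ hpw]
  constructor
  · rintro ⟨x, hx, hxn⟩
    refine ⟨x, hperm.mem_iff.mp hx, ?_⟩
    rw [← hperm.count_eq]
    exact_mod_cast hxn
  · rintro ⟨x, hx, hxn⟩
    refine ⟨x, hperm.mem_iff.mpr hx, ?_⟩
    rw [hperm.count_eq, hxn]

-- the accumulator fold computes the two countP's
theorem foldl_counts (lines : List String) (a b : Int) :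
    lines.foldl (fun (acc : Int × Int) box =>
      let counts := groupLens (PySem.List.sorted box.toList (fun c => c) false)
      let acc := if (2 : Int) ∈ counts then (acc.1 + 1, acc.2) else acc
      if (3 : Int) ∈ counts then (acc.1, acc.2 + 1) else acc) (a, b)
    = (a + lines.countP (fun line => hasExactly line 2),
       b + lines.countP (fun line => hasExactly line 3)) := by
  induction lines generalizing a b with
  | nil => simp
  | cons l ls ih =>
    simp only [List.foldl_cons, List.countP_cons]
    rw [← counts_iff_hasExactly l 2, ← counts_iff_hasExactly l 3]
    by_cases h2 : (2 : Int) ∈ groupLens (PySem.List.sorted l.toList (fun c => c) false) <;>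
      by_cases h3 : (3 : Int) ∈ groupLens (PySem.List.sorted l.toList (fun c => c) false) <;>
      simp [h2, h3, ih, Prod.ext_iff] <;> omega

-- ===== VERDICT (by name: the statement is the Claim_ definition above) =====
theorem part1_spec : Claim_equal_part1 := by
  intro inp _
  unfold Spec_part1 part1 part1_alt
  simp only [foldl_counts, zero_add]
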